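-- pv_equiv track=rewrite | github.com/Kim-Dong-Jun99/Programmers | 2018 KAKAO BLIND RECRUITMENT/[1차] 프렌즈 블록.py | afterBomb
-- ===== SOURCE A (Python) =====
-- def afterBomb(board):
--     for j in range(len(board[0])):
--         i = len(board) - 1
--         while i > -1:
--             if board[i][j].isdigit():
--                 k = i - 1
--                 while k > -1:
--                     if board[k][j].isalpha():
--                         board[i] = board[i][:j] + board[k][j] + board[i][j + 1:]
--                         board[k] = board[k][:j] + '0' + board[k][j + 1:]
--                         break
--                     else:
--                         k -= 1
--             i -= 1
--
--     return board
-- ===== SOURCE B (Python) =====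
-- def afterBomb(board):
--     # Per column: one bottom-up pass collecting the letters, then one pass placing
--     # them at the bottom ('0' over vacated letter cells, digits and other chars stay).
--     # Unlike A, B does not mutate the caller's list; equivalence is about the return value.
--     n = len(board)
--     w = len(board[0])
--     cols = []
--     for j in range(w):
--         col = [board[i][j] for i in range(n - 1, -1, -1)]  # bottom-up
--         letters = iter([c for c in col if c.isalpha()])
--         out = []
--         for c in col:
--             if c.isalpha() or c.isdigit():
--                 nxt = next(letters, None)
--                 out.append(nxt if nxt is not None else ('0' if c.isalpha() else c))
--             else:
--                 out.append(c)
--         cols.append(out[::-1])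
--     return [''.join(cols[j][i] for j in range(w)) + board[i][w:] for i in range(n)]
-- ===== Notes on version B (the rewrite author's own statement) =====
-- stated objective: alternative
-- what changed: Instead of scanning, for every digit cell of every column, all cells above it for a letter (and rebuilding the row string on each move), B does two linear passes per column: collect the letters bottom-up, then re-emit the column with those letters packed at the bottom, '0' over vacated letter cells, digits and other characters left in place; B also returns a fresh list instead of mutating the argument.
import Mathlib
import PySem

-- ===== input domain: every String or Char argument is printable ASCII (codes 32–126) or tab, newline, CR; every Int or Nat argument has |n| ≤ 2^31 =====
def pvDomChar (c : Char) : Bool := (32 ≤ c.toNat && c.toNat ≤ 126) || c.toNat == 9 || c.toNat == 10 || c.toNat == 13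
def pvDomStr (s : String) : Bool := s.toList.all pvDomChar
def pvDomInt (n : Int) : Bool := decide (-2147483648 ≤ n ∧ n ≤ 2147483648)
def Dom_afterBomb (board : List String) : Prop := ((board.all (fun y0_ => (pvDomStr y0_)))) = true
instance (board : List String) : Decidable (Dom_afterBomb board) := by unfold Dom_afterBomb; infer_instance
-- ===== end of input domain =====

-- B replaces A's per-digit-cell upward scan by an alternative algorithm: two linear passes
-- per column (collect the letters bottom-up, place them at the bottom, '0' over vacated
-- letter cells).  A mutates its argument list in place and returns it; B builds a fresh
-- list — the equivalence proved here is about the RETURN value only.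

-- ===== PORT A =====
-- board[i][j] for 0 ≤ i,j; exact when in range (Pre_ guarantees that), ' ' where Python raises
def pvRowChar (b : List String) (i j : Nat) : Char := ((b.getD i "").toList).getD j ' '
-- board[i][:j] + c + board[i][j+1:] for 0 ≤ j (exact there: Python slices with nonneg bounds)
def pvSetAt (s : String) (j : Nat) (c : Char) : String :=
  String.ofList (s.toList.take j ++ c :: s.toList.drop (j + 1))
-- inner `while k > -1` loop; fuel = k+1, k counts down, break on the first letter above
def pvInnerK (j i : Nat) : List String → Nat → List String
  | b, 0 => b
  | b, k + 1 =>
    let ck := pvRowChar b k j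
    if PySem.Chars.isalpha ck then
      let b1 := b.set i (pvSetAt (b.getD i "") j ck)
      b1.set k (pvSetAt (b1.getD k "") j '0')
    else pvInnerK j i b k
-- outer `while i > -1` loop; fuel = i+1, i counts down
def pvOuterI (j : Nat) : List String → Nat → List String
  | b, 0 => b
  | b, i + 1 =>
    pvOuterI j (if PySem.Chars.isdigit (pvRowChar b i j) then pvInnerK j i b i else b) i
def afterBomb (board : List String) : List String :=
  -- for j in range(len(board[0])): … ; i = len(board)-1 each round
  (List.range (PySem.Str.len (board.headD "")).toNat).foldl
    (fun b j => pvOuterI j b b.length) board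

-- ===== PORT B =====
-- `next(letters, None)` placement: next letter while any remain, else '0' over a letter
-- cell / keep a digit cell; cells that are neither stay as they are
def pvFillCol : List Char → List Char → List Char
  | _, [] => []
  | ls, c :: cs =>
    if PySem.Chars.isalpha c || PySem.Chars.isdigit c then
      match ls with
      | a :: ls' => a :: pvFillCol ls' cs
      | [] => (if PySem.Chars.isalpha c then '0' else c) :: pvFillCol [] cs
    else c :: pvFillCol ls cs
-- col = [board[i][j] for i in range(n-1, -1, -1)]  (the column, bottom-up)
def pvColOf (board : List String) (j : Nat) : List Char :=
  board.reverse.map (fun r => r.toList.getD j ' ')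
def afterBomb_alt (board : List String) : List String :=
  let n := board.length
  let w := (PySem.Str.len (board.headD "")).toNat
  let cols := (List.range w).map (fun j =>
    let col := pvColOf board j
    (pvFillCol (col.filter PySem.Chars.isalpha) col).reverse)
  (List.range n).map (fun i =>
    String.ofList ((cols.map (fun cj => cj.getD i ' ')) ++ ((board.getD i "").toList.drop w)))

-- ===== PRECONDITION & SPEC =====
-- Pre_ excludes exactly the inputs where Python A raises IndexError: the empty board
-- (board[0]) and boards where some row is shorter than row 0 (board[i][j] out of range).
def Pre_afterBomb (board : List String) : Prop :=
  board ≠ [] ∧ ∀ r ∈ board, (board.headD "").toList.length ≤ r.toList.length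
instance (board : List String) : Decidable (Pre_afterBomb board) := by
  unfold Pre_afterBomb; infer_instance
def pvWitness_afterBomb : List String := ["a0", "0b", "#c"]
def Spec_afterBomb (board : List String) (out : List String) : Prop := out = afterBomb_alt board
instance (board : List String) (out : List String) : Decidable (Spec_afterBomb board out) := by
  unfold Spec_afterBomb; infer_instance

-- ===== CLAIM (what is proved, stated in full; the proofs are below) =====
def Claim_equal_afterBomb : Prop :=
  ∀ (board : List String), Dom_afterBomb board → Pre_afterBomb board →
    Spec_afterBomb board (afterBomb board)

-- ===== LEMMAS AND PROOFS =====

-- character facts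
theorem pv_alpha_not_digit {c : Char} (h : PySem.Chars.isalpha c = true) :
    PySem.Chars.isdigit c = false := by
  simp [PySem.Chars.isalpha, PySem.Chars.isdigit, PySem.Chars.isupper, PySem.Chars.islower] at *
  rcases h with h | h
  · intro _; exact lt_of_lt_of_le (by decide : ('9' : Char) < 'A') h.1
  · intro _; exact lt_of_lt_of_le (by decide : ('9' : Char) < 'a') h.1

-- list getD / set at the length of a prefix
theorem pv_getD_append (l1 l2 : List Char) (a d : Char) :
    (l1 ++ a :: l2).getD l1.length d = a := by
  induction l1 with
  | nil => rfl
  | cons x xs ih => simpa using ih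

theorem pv_set_append (l1 l2 : List Char) (a b : Char) :
    (l1 ++ a :: l2).set l1.length b = l1 ++ b :: l2 := by
  induction l1 with
  | nil => rfl
  | cons x xs ih => simpa using ih

-- ----- column-level transcription of A's two loops -----
def pvCInner (i : Nat) : List Char → Nat → List Char
  | c, 0 => c
  | c, k + 1 =>
    let ck := c.getD k ' '
    if PySem.Chars.isalpha ck then (c.set i ck).set k '0'
    else pvCInner i c k
def pvCOuter : List Char → Nat → List Char
  | c, 0 => c
  | c, i + 1 => pvCOuter (if PySem.Chars.isdigit (c.getD i ' ') then pvCInner i c i else c) i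

-- pull the first letter of a (bottom-up) list, leaving '0' behind
def pvPull : List Char → Option (Char × List Char)
  | [] => none
  | y :: ys => if PySem.Chars.isalpha y then some (y, '0' :: ys)
               else (pvPull ys).map (fun p => (p.1, y :: p.2))

theorem pvPull_length : ∀ (u u' : List Char) (a : Char),
    pvPull u = some (a, u') → u'.length = u.length := by
  intro u
  induction u with
  | nil => intro u' a h; simp [pvPull] at h
  | cons y ys ih =>
    intro u' a h
    simp only [pvPull] at h
    split at h
    · simp at h; simp [← h.2]
    · cases hp : pvPull ys with
      | none => rw [hp] at h; simp at h
      | some p =>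
        rw [hp] at h; simp at h
        rcases h with ⟨h1, h2⟩
        simp [← h2, ih p.2 p.1 (by rw [hp])]

-- A's bottom-up process on a reversed (bottom-first) column
def pvARev : List Char → List Char
  | [] => []
  | x :: xs =>
    if PySem.Chars.isdigit x then
      match h : pvPull xs with
      | some (a, xs') => a :: pvARev xs'
      | none => x :: pvARev xs
    else x :: pvARev xs
  termination_by l => l.length
  decreasing_by
  · have := pvPull_length _ _ _ h; simp [this]
  · simp
  · simp

theorem pvARev_digit_some {x : Char} {xs xs' : List Char} {a : Char}
    (hd : PySem.Chars.isdigit x = true) (hp : pvPull xs = some (a, xs')) :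
    pvARev (x :: xs) = a :: pvARev xs' := by
  rw [pvARev.eq_def]
  simp only [hd, if_pos]
  split
  · rename_i a2 xs2 h2; rw [hp] at h2; simp_all
  · rename_i h2; rw [hp] at h2; simp at h2

theorem pvARev_digit_none {x : Char} {xs : List Char}
    (hd : PySem.Chars.isdigit x = true) (hp : pvPull xs = none) :
    pvARev (x :: xs) = x :: pvARev xs := by
  rw [pvARev.eq_def]
  simp only [hd, if_pos]
  split
  · rename_i a2 xs2 h2; rw [hp] at h2; simp at h2
  · rfl

theorem pvARev_not_digit {x : Char} {xs : List Char}
    (hd : ¬ PySem.Chars.isdigit x = true) :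
    pvARev (x :: xs) = x :: pvARev xs := by
  rw [pvARev.eq_def]; simp [hd]

-- the inner loop finds the first letter of u (= nearest letter above), puts it at i, '0' behind
theorem pvCInner_spec (x : Char) (e xs : List Char) :
    ∀ (u v : List Char), xs = v ++ u →
      pvCInner xs.length (xs.reverse ++ x :: e) u.length =
        (match pvPull u with
         | some (a, u') => (v ++ u').reverse ++ a :: e
         | none => xs.reverse ++ x :: e) := by
  intro u
  induction u with
  | nil => intro v hv; simp [pvPull, pvCInner]
  | cons y ys ih =>
    intro v hv
    have hc : xs.reverse ++ x :: e = ys.reverse ++ y :: (v.reverse ++ x :: e) := by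
      subst hv; simp
    have hget : (xs.reverse ++ x :: e).getD ys.length ' ' = y := by
      rw [hc, ← List.length_reverse (as := ys)]; exact pv_getD_append _ _ _ _
    show pvCInner xs.length (xs.reverse ++ x :: e) (ys.length + 1) = _
    rw [pvCInner]
    simp only [hget]
    by_cases ha : PySem.Chars.isalpha y = true
    · simp only [ha, if_pos, pvPull]
      have hset1 : (xs.reverse ++ x :: e).set xs.length y = xs.reverse ++ y :: e := by
        rw [← List.length_reverse (as := xs)]; exact pv_set_append _ _ _ _
      have hc2 : xs.reverse ++ y :: e = ys.reverse ++ y :: (v.reverse ++ y :: e) := by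
        subst hv; simp
      have hset2 : (xs.reverse ++ y :: e).set ys.length '0'
          = ys.reverse ++ '0' :: (v.reverse ++ y :: e) := by
        rw [hc2, ← List.length_reverse (as := ys)]; exact pv_set_append _ _ _ _
      simp [hset1, hset2]
    · rw [if_neg ha]
      have := ih (v ++ [y]) (by simp [hv])
      rw [this]
      have hpp : pvPull (y :: ys) = (pvPull ys).map (fun p => (p.1, y :: p.2)) := by
        simp [pvPull, ha]
      cases hp : pvPull ys with
      | none => simp [hpp, hp]
      | some p => simp [hpp, hp]

-- the outer loop on a column of length m = the recursion pvARev on the bottom-up list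
theorem pvCOuter_spec : ∀ (m : Nat) (rs e : List Char), rs.length = m →
    pvCOuter (rs.reverse ++ e) m = (pvARev rs).reverse ++ e := by
  intro m
  induction m using Nat.strong_induction_on with
  | _ m ih =>
    intro rs e hlen
    cases rs with
    | nil => simp at hlen; subst hlen; simp [pvCOuter, pvARev]
    | cons x xs =>
      cases m with
      | zero => simp at hlen
      | succ m' =>
        have hm' : xs.length = m' := by simpa using hlen
        have hrev : (x :: xs).reverse ++ e = xs.reverse ++ x :: e := by simp
        have hget : (xs.reverse ++ x :: e).getD m' ' ' = x := by
          rw [← hm', ← List.length_reverse (as := xs)]; exact pv_getD_append _ _ _ _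
        rw [hrev]
        show pvCOuter (xs.reverse ++ x :: e) (m' + 1) = _
        rw [pvCOuter]
        simp only [hget]
        by_cases hd : PySem.Chars.isdigit x = true
        · simp only [hd, if_pos]
          have hin := pvCInner_spec x e xs xs [] (by simp)
          rw [hm'] at hin
          rw [hin]
          cases hp : pvPull xs with
          | some p =>
            obtain ⟨a, xs'⟩ := p
            have hlen' : xs'.length = m' := by rw [pvPull_length _ _ _ hp]; exact hm'
            simp only [List.nil_append]
            rw [ih m' (Nat.lt_succ_self _) xs' (a :: e) hlen']
            rw [pvARev_digit_some hd hp]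
            simp
          | none =>
            simp only
            rw [ih m' (Nat.lt_succ_self _) xs (x :: e) hm']
            rw [pvARev_digit_none hd hp]
            simp
        · rw [if_neg hd]
          rw [ih m' (Nat.lt_succ_self _) xs (x :: e) hm']
          rw [pvARev_not_digit hd]
          simp

-- pvPull vs filter isalpha
theorem pvPull_none_filter : ∀ (u : List Char), pvPull u = none →
    u.filter PySem.Chars.isalpha = [] := by
  intro u
  induction u with
  | nil => intro _; rfl
  | cons y ys ih =>
    intro h
    simp only [pvPull] at h
    split at h
    · simp at h
    · cases hp : pvPull ys with
      | none => simp [List.filter, *, ih hp]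
      | some p => rw [hp] at h; simp at h

theorem pvPull_some_filter : ∀ (u u' : List Char) (a : Char), pvPull u = some (a, u') →
    u.filter PySem.Chars.isalpha = a :: u'.filter PySem.Chars.isalpha := by
  intro u
  induction u with
  | nil => intro u' a h; simp [pvPull] at h
  | cons y ys ih =>
    intro u' a h
    simp only [pvPull] at h
    split at h
    · rename_i halpha
      simp at h
      obtain ⟨h1, h2⟩ := h
      subst h1; subst h2
      simp [halpha, (by decide : PySem.Chars.isalpha '0' = false)]
    · rename_i halpha
      cases hp : pvPull ys with
      | none => rw [hp] at h; simp at h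
      | some p =>
        rw [hp] at h; simp at h
        obtain ⟨h1, h2⟩ := h
        subst h1; subst h2
        simp [halpha, ih p.2 p.1 (by rw [hp])]

-- replacing the pulled letter by '0' does not change what pvFillCol produces
theorem pvFill_pull : ∀ (u u' : List Char) (a : Char), pvPull u = some (a, u') →
    ∀ ls, pvFillCol ls u' = pvFillCol ls u := by
  intro u
  induction u with
  | nil => intro u' a h; simp [pvPull] at h
  | cons y ys ih =>
    intro u' a h ls
    simp only [pvPull] at h
    split at h
    · rename_i halpha
      simp at h
      obtain ⟨h1, h2⟩ := h
      subst h2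
      have hz : (PySem.Chars.isalpha '0' || PySem.Chars.isdigit '0') = true := by decide
      have hy : (PySem.Chars.isalpha y || PySem.Chars.isdigit y) = true := by simp [halpha]
      cases ls with
      | nil =>
        simp [pvFillCol, halpha, (by decide : PySem.Chars.isalpha '0' = false)]
      | cons a' ls' => simp [pvFillCol, hz, hy]
    · rename_i halpha
      cases hp : pvPull ys with
      | none => rw [hp] at h; simp at h
      | some p =>
        rw [hp] at h; simp at h
        obtain ⟨h1, h2⟩ := h
        subst h2
        by_cases hb : (PySem.Chars.isalpha y || PySem.Chars.isdigit y) = true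
        · cases ls with
          | nil => simp [pvFillCol, hb, ih p.2 p.1 (by rw [hp])]
          | cons a' ls' => simp [pvFillCol, hb, ih p.2 p.1 (by rw [hp])]
        · simp [pvFillCol, hb, ih p.2 p.1 (by rw [hp])]

-- A's compaction = B's two-pass fill
theorem pvARev_fill : ∀ (n : Nat) (rs : List Char), rs.length = n →
    pvARev rs = pvFillCol (rs.filter PySem.Chars.isalpha) rs := by
  intro n
  induction n using Nat.strong_induction_on with
  | _ n ih =>
    intro rs hlen
    cases rs with
    | nil => rw [pvARev.eq_def]; simp [pvFillCol]
    | cons x xs =>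
      cases n with
      | zero => simp at hlen
      | succ n' =>
        have hm : xs.length = n' := by simpa using hlen
        by_cases hd : PySem.Chars.isdigit x = true
        · have hxf : PySem.Chars.isalpha x = false := by
            by_contra hx
            simp at hx
            rw [pv_alpha_not_digit hx] at hd
            exact absurd hd (by simp)
          have hb : (PySem.Chars.isalpha x || PySem.Chars.isdigit x) = true := by simp [hd]
          cases hp : pvPull xs with
          | some p =>
            obtain ⟨a, xs'⟩ := p
            have hlen' : xs'.length = n' := by rw [pvPull_length _ _ _ hp]; exact hm
            rw [pvARev_digit_some hd hp]
            rw [ih n' (Nat.lt_succ_self _) xs' hlen']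
            have hflt := pvPull_some_filter xs xs' a hp
            simp [pvFillCol, hxf, hflt,
              pvFill_pull xs xs' a hp]
            intro h
            simp [h] at hd
          | none =>
            have hflt := pvPull_none_filter xs hp
            rw [pvARev_digit_none hd hp]
            rw [ih n' (Nat.lt_succ_self _) xs hm]
            simp [pvFillCol, hxf, hflt]
        · rw [pvARev_not_digit hd]
          rw [ih n' (Nat.lt_succ_self _) xs hm]
          by_cases hx : PySem.Chars.isalpha x = true
          · simp [pvFillCol, hx]
          · simp at hd
            simp [pvFillCol, hx, hd]

-- ----- string-cell basics -----
theorem pvSetAt_toList (s : String) (j : Nat) (c : Char) (h : j < s.toList.length) :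
    (pvSetAt s j c).toList = s.toList.set j c := by
  simp [pvSetAt, List.set_eq_take_cons_drop c h]

theorem pvSetAt_id (s : String) (j : Nat) (h : j < s.toList.length) :
    pvSetAt s j (s.toList.getD j ' ') = s := by
  apply String.toList_inj.mp
  rw [pvSetAt_toList _ _ _ h, List.getD_eq_getElem _ _ h, List.set_getElem_self]

theorem pvSetAt_len (s : String) (j : Nat) (c : Char) (h : j < s.toList.length) :
    (pvSetAt s j c).toList.length = s.toList.length := by
  rw [pvSetAt_toList _ _ _ h]; simp

theorem pvSetAt_over (s : String) (j : Nat) (c c' : Char) (h : j < s.toList.length) :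
    pvSetAt (pvSetAt s j c) j c' = pvSetAt s j c' := by
  apply String.toList_inj.mp
  rw [pvSetAt_toList, pvSetAt_toList _ _ _ h, pvSetAt_toList _ _ _ h, List.set_set]
  rw [pvSetAt_len _ _ _ h]; exact h

-- ----- writing one column of a board -----
def pvGetCol (b : List String) (j : Nat) : List Char := b.map (fun r => r.toList.getD j ' ')
def pvWrite (b : List String) (j : Nat) (cs : List Char) : List String :=
  List.zipWith (fun r c => pvSetAt r j c) b cs

theorem pvGetCol_length (b : List String) (j : Nat) : (pvGetCol b j).length = b.length := by
  simp [pvGetCol]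

theorem pvWrite_length (b : List String) (j : Nat) (cs : List Char)
    (h : cs.length = b.length) : (pvWrite b j cs).length = b.length := by
  simp [pvWrite, h]

theorem pvWrite_getD (b : List String) (j : Nat) (cs : List Char) (i : Nat)
    (hi : i < b.length) (h : cs.length = b.length) :
    (pvWrite b j cs).getD i "" = pvSetAt (b.getD i "") j (cs.getD i ' ') := by
  have hi2 : i < (pvWrite b j cs).length := by rw [pvWrite_length _ _ _ h]; exact hi
  rw [List.getD_eq_getElem _ _ hi2, List.getD_eq_getElem _ _ hi,
    List.getD_eq_getElem _ _ (h ▸ hi)]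
  simp [pvWrite]

theorem pvWrite_id (b : List String) (j : Nat) (H : ∀ r ∈ b, j < r.toList.length) :
    b = pvWrite b j (pvGetCol b j) := by
  induction b with
  | nil => rfl
  | cons r bs ih =>
    simp only [pvGetCol, pvWrite, List.map_cons, List.zipWith_cons_cons]
    rw [pvSetAt_id _ _ (H r (by simp))]
    exact congrArg _ (ih (fun r hr => H r (by simp [hr])))

theorem pvWrite_set (b : List String) (j : Nat) (cs : List Char) (i : Nat) (c : Char)
    (hi : i < b.length) (h : cs.length = b.length) :
    (pvWrite b j cs).set i (pvSetAt (b.getD i "") j c) = pvWrite b j (cs.set i c) := by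
  apply List.ext_getElem
  · simp [pvWrite, h]
  · intro t h1 h2
    have ht : t < b.length := by simp [pvWrite, h] at h1; omega
    rw [List.getElem_set]
    simp only [pvWrite, List.getElem_zipWith]
    rw [List.getElem_set]
    split
    · rename_i he; subst he; rw [← List.getD_eq_getElem b "" ht]
    · rfl

theorem pvRowChar_write (b : List String) (j : Nat) (cs : List Char) (i : Nat)
    (H : ∀ r ∈ b, j < r.toList.length) (hi : i < b.length) (h : cs.length = b.length) :
    pvRowChar (pvWrite b j cs) i j = cs.getD i ' ' := by
  have hb : j < (b.getD i "").toList.length := by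
    rw [List.getD_eq_getElem _ _ hi]; exact H _ (List.getElem_mem hi)
  rw [pvRowChar, pvWrite_getD _ _ _ _ hi h, pvSetAt_toList _ _ _ hb]
  have hlen : j < ((b.getD i "").toList.set j (cs.getD i ' ')).length := by
    rw [List.length_set]; exact hb
  rw [List.getD_eq_getElem _ _ hlen, List.getElem_set_self]

theorem pvCInner_length (i : Nat) : ∀ (m : Nat) (c : List Char),
    (pvCInner i c m).length = c.length := by
  intro m
  induction m with
  | zero => intro c; rfl
  | succ k ih =>
    intro c
    rw [pvCInner]
    split
    · simp
    · exact ih c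

-- A's inner loop on the board = the same loop on column j
theorem pvInnerK_write (j : Nat) (b : List String) (H : ∀ r ∈ b, j < r.toList.length)
    (i : Nat) (hi : i < b.length) :
    ∀ (m : Nat) (cs : List Char), cs.length = b.length → m ≤ i →
      pvInnerK j i (pvWrite b j cs) m = pvWrite b j (pvCInner i cs m) := by
  intro m
  induction m with
  | zero => intro cs _ _; rfl
  | succ k ih =>
    intro cs hcs hk
    have hkn : k < b.length := lt_of_lt_of_le (Nat.lt_of_lt_of_le (Nat.lt_succ_self k) hk) (le_of_lt hi) |>.trans_le (le_refl _)
    have hrc : pvRowChar (pvWrite b j cs) k j = cs.getD k ' ' :=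
      pvRowChar_write b j cs k H hkn hcs
    have hbj : j < (b.getD i "").toList.length := by
      rw [List.getD_eq_getElem _ _ hi]; exact H _ (List.getElem_mem hi)
    rw [pvInnerK, pvCInner]
    simp only [hrc]
    by_cases ha : PySem.Chars.isalpha (cs.getD k ' ') = true
    · simp only [ha, if_pos]
      rw [pvWrite_getD _ _ _ _ hi hcs, pvSetAt_over _ _ _ _ hbj,
        pvWrite_set _ _ _ _ _ hi hcs]
      have hcs2 : (cs.set i (cs.getD k ' ')).length = b.length := by simp [hcs]
      have hbk : j < (b.getD k "").toList.length := by
        rw [List.getD_eq_getElem _ _ hkn]; exact H _ (List.getElem_mem hkn)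
      rw [pvWrite_getD _ _ _ _ hkn hcs2, pvSetAt_over _ _ _ _ hbk,
        pvWrite_set _ _ _ _ _ hkn hcs2]
    · simp only [ha, Bool.false_eq_true, if_false]
      exact ih cs hcs (le_trans (Nat.le_succ k) hk)

-- A's outer loop on the board = the same loop on column j
theorem pvOuterI_write (j : Nat) (b : List String) (H : ∀ r ∈ b, j < r.toList.length) :
    ∀ (m : Nat) (cs : List Char), cs.length = b.length → m ≤ b.length →
      pvOuterI j (pvWrite b j cs) m = pvWrite b j (pvCOuter cs m) := by
  intro m
  induction m with
  | zero => intro cs _ _; rfl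
  | succ i ih =>
    intro cs hcs hm
    have hi : i < b.length := hm
    have hrc : pvRowChar (pvWrite b j cs) i j = cs.getD i ' ' :=
      pvRowChar_write b j cs i H hi hcs
    rw [pvOuterI, pvCOuter]
    simp only [hrc]
    by_cases hd : PySem.Chars.isdigit (cs.getD i ' ') = true
    · simp only [hd, if_pos]
      rw [pvInnerK_write j b H i hi i cs hcs le_rfl]
      exact ih _ (by rw [pvCInner_length]; exact hcs) (le_trans (Nat.le_succ i) hm)
    · simp only [hd, Bool.false_eq_true, if_false]
      exact ih cs hcs (le_trans (Nat.le_succ i) hm)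

-- ----- the per-column transform and the board model -----
def pvTC (cs : List Char) : List Char :=
  (pvFillCol (cs.reverse.filter PySem.Chars.isalpha) cs.reverse).reverse

def pvModel (b0 : List String) (w t : Nat) : List String :=
  (List.range b0.length).map (fun i =>
    String.ofList ((List.range w).map (fun j =>
        if j < t then (pvTC (pvGetCol b0 j)).getD i ' ' else pvRowChar b0 i j)
      ++ ((b0.getD i "").toList.drop w)))

theorem pvFillCol_length : ∀ (cs ls : List Char), (pvFillCol ls cs).length = cs.length := by
  intro cs
  induction cs with
  | nil => intro ls; rfl
  | cons c cs ih =>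
    intro ls
    by_cases hb : (PySem.Chars.isalpha c || PySem.Chars.isdigit c) = true
    · cases ls with
      | nil => simp [pvFillCol, hb, ih]
      | cons a ls' => simp [pvFillCol, hb, ih]
    · simp [pvFillCol, hb, ih]

theorem pvTC_length (cs : List Char) : (pvTC cs).length = cs.length := by
  simp [pvTC, pvFillCol_length]

theorem pvModel_length (b0 : List String) (w t : Nat) :
    (pvModel b0 w t).length = b0.length := by simp [pvModel]

theorem pvModel_row (b0 : List String) (w t i : Nat) (hi : i < b0.length) :
    ((pvModel b0 w t).getD i "").toList =
      (List.range w).map (fun j =>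
        if j < t then (pvTC (pvGetCol b0 j)).getD i ' ' else pvRowChar b0 i j)
      ++ ((b0.getD i "").toList.drop w) := by
  rw [List.getD_eq_getElem _ _ (by rw [pvModel_length]; exact hi)]
  simp [pvModel]

theorem pvModel_rowlen (b0 : List String) (w t i : Nat) (hi : i < b0.length)
    (hw : w ≤ (b0.getD i "").toList.length) :
    ((pvModel b0 w t).getD i "").toList.length = (b0.getD i "").toList.length := by
  rw [pvModel_row _ _ _ _ hi, List.length_append, List.length_map,
    List.length_range, List.length_drop]
  omega

theorem pvModel_mem_len (b0 : List String) (w t : Nat)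
    (HP : ∀ r ∈ b0, w ≤ r.toList.length) (j : Nat) (hj : j < w) :
    ∀ r ∈ pvModel b0 w t, j < r.toList.length := by
  intro r hr
  obtain ⟨i, hi, hri⟩ := List.getElem_of_mem hr
  have hi' : i < b0.length := by rw [pvModel_length] at hi; exact hi
  have := pvModel_rowlen b0 w t i hi'
    (by rw [List.getD_eq_getElem _ _ hi']; exact HP _ (List.getElem_mem hi'))
  rw [← hri, ← List.getD_eq_getElem _ "" hi, this]
  have := HP _ (List.getElem_mem hi')
  rw [List.getD_eq_getElem _ _ hi']
  omega

theorem pv_range_map_getD (l : List Char) (w : Nat) (hw : w ≤ l.length) :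
    (List.range w).map (fun j => l.getD j ' ') = l.take w := by
  apply List.ext_getElem
  · simp; omega
  · intro t h1 h2
    simp only [List.getElem_map, List.getElem_range, List.getElem_take]
    rw [List.getD_eq_getElem _ _ (by simp at h1; omega)]

theorem pvModel_zero (b0 : List String) (w : Nat)
    (HP : ∀ r ∈ b0, w ≤ r.toList.length) : b0 = pvModel b0 w 0 := by
  apply List.ext_getElem
  · rw [pvModel_length]
  · intro i h1 h2
    apply String.toList_inj.mp
    rw [← List.getD_eq_getElem _ "" h2, pvModel_row _ _ _ _ h1]
    simp only [Nat.not_lt_zero, if_false]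
    have hw : w ≤ (b0.getD i "").toList.length := by
      rw [List.getD_eq_getElem _ _ h1]; exact HP _ (List.getElem_mem h1)
    have : (List.range w).map (fun j => pvRowChar b0 i j) =
        (b0.getD i "").toList.take w := by
      rw [← pv_range_map_getD _ _ hw]; rfl
    rw [this, List.take_append_drop, List.getD_eq_getElem _ _ h1]

theorem pvGetCol_model (b0 : List String) (w t j : Nat) (hj : j < w) (ht : t ≤ j)
    (HP : ∀ r ∈ b0, w ≤ r.toList.length) :
    pvGetCol (pvModel b0 w t) j = pvGetCol b0 j := by
  apply List.ext_getElem
  · simp [pvGetCol, pvModel_length]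
  · intro i h1 h2
    have hi : i < b0.length := by simpa [pvGetCol, pvModel_length] using h1
    simp only [pvGetCol, List.getElem_map]
    rw [← List.getD_eq_getElem _ "" (by rw [pvModel_length]; exact hi),
      pvModel_row _ _ _ _ hi,
      List.getD_append _ _ _ _ (by simp; omega)]
    rw [List.getD_eq_getElem _ _ (by simp; omega)]
    simp only [List.getElem_map, List.getElem_range]
    rw [if_neg (by omega)]
    rw [← List.getD_eq_getElem _ "" hi]
    rfl

theorem pv_range_map_if (w t : Nat) (g h : Nat → Char) (ht : t < w) :
    (List.range w).map (fun j => if j < t + 1 then g j else h j) =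
      ((List.range w).map (fun j => if j < t then g j else h j)).set t (g t) := by
  apply List.ext_getElem
  · simp
  · intro k h1 h2
    have hk : k < w := by simpa using h1
    rw [List.getElem_set]
    simp only [List.getElem_map, List.getElem_range]
    by_cases he : t = k
    · rw [if_pos he, he, if_pos (by omega)]
    · rw [if_neg he]
      by_cases hkt : k < t
      · rw [if_pos (by omega), if_pos hkt]
      · rw [if_neg (by omega), if_neg hkt]

theorem pvModel_step (b0 : List String) (w t : Nat) (ht : t < w)
    (HP : ∀ r ∈ b0, w ≤ r.toList.length) :
    pvWrite (pvModel b0 w t) t (pvTC (pvGetCol b0 t)) = pvModel b0 w (t + 1) := by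
  apply List.ext_getElem
  · rw [pvWrite_length, pvModel_length, pvModel_length]
    rw [pvTC_length, pvGetCol_length, pvModel_length]
  · intro i h1 h2
    have hi : i < b0.length := by
      rw [pvModel_length] at h2; exact h2
    have hcs : (pvTC (pvGetCol b0 t)).length = (pvModel b0 w t).length := by
      rw [pvTC_length, pvGetCol_length, pvModel_length]
    have hw : w ≤ (b0.getD i "").toList.length := by
      rw [List.getD_eq_getElem _ _ hi]; exact HP _ (List.getElem_mem hi)
    have hrowt : t < ((pvModel b0 w t).getD i "").toList.length := by
      rw [pvModel_rowlen _ _ _ _ hi hw]; omega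
    apply String.toList_inj.mp
    rw [← List.getD_eq_getElem _ "" h1,
      pvWrite_getD _ _ _ _ (by rw [pvModel_length]; exact hi) hcs,
      pvSetAt_toList _ _ _ hrowt,
      pvModel_row _ _ _ _ hi,
      List.set_append_left _ _ (by simp; omega),
      ← List.getD_eq_getElem _ "" h2, pvModel_row _ _ _ _ hi]
    congr 1
    have := pv_range_map_if w t
      (fun j => (pvTC (pvGetCol b0 j)).getD i ' ') (fun j => pvRowChar b0 i j) ht
    rw [this]

-- the fold over columns
theorem pv_fold_model (b0 : List String) (w : Nat)
    (HP : ∀ r ∈ b0, w ≤ r.toList.length) :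
    ∀ t, t ≤ w →
      (List.range t).foldl (fun b j => pvOuterI j b b.length) b0 = pvModel b0 w t := by
  intro t
  induction t with
  | zero => intro _; simpa using pvModel_zero b0 w HP
  | succ t ih =>
    intro ht
    have ht' : t < w := ht
    rw [List.range_succ, List.foldl_append, ih (le_of_lt ht')]
    simp only [List.foldl_cons, List.foldl_nil]
    have Hm : ∀ r ∈ pvModel b0 w t, t < r.toList.length :=
      pvModel_mem_len b0 w t HP t ht'
    have hcol : pvGetCol (pvModel b0 w t) t = pvGetCol b0 t :=
      pvGetCol_model b0 w t t ht' le_rfl HP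
    have hclen : (pvGetCol b0 t).length = (pvModel b0 w t).length := by
      rw [pvGetCol_length, pvModel_length]
    calc pvOuterI t (pvModel b0 w t) (pvModel b0 w t).length
        = pvOuterI t (pvWrite (pvModel b0 w t) t (pvGetCol (pvModel b0 w t) t))
            (pvModel b0 w t).length := by rw [← pvWrite_id _ _ Hm]
      _ = pvWrite (pvModel b0 w t) t (pvCOuter (pvGetCol b0 t) (pvModel b0 w t).length) := by
            rw [hcol]; exact pvOuterI_write t (pvModel b0 w t) Hm _ _ hclen le_rfl
      _ = pvWrite (pvModel b0 w t) t (pvTC (pvGetCol b0 t)) := by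
            congr 1
            have h1 : (pvGetCol b0 t).reverse.reverse ++ [] = pvGetCol b0 t := by simp
            have h2 : (pvGetCol b0 t).reverse.length = (pvModel b0 w t).length := by
              rw [List.length_reverse, pvGetCol_length, pvModel_length]
            rw [← h1, pvCOuter_spec _ _ _ h2,
              pvARev_fill (pvGetCol b0 t).reverse.length _ rfl]
            simp [pvTC]
      _ = pvModel b0 w (t + 1) := pvModel_step b0 w t ht' HP

-- ===== VERDICT (by name: the statement is the Claim_ definition above) =====
theorem pvColOf_eq (board : List String) (j : Nat) :
    pvColOf board j = (pvGetCol board j).reverse := by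
  simp [pvColOf, pvGetCol]

theorem afterBomb_spec : Claim_equal_afterBomb := by
  intro board _dom hpre
  obtain ⟨_hne, hlen⟩ := hpre
  show afterBomb board = afterBomb_alt board
  have hw : (PySem.Str.len (board.headD "")).toNat = (board.headD "").toList.length := by
    simp [PySem.Str.len_eq]
  rw [afterBomb, hw,
    pv_fold_model board ((board.headD "").toList.length) hlen _ le_rfl]
  simp only [afterBomb_alt, hw]
  rw [pvModel]
  apply List.map_congr_left
  intro i _
  congr 1
  congr 1
  rw [List.map_map]
  apply List.map_congr_left
  intro j hj
  rw [List.mem_range] at hj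
  rw [if_pos hj]
  simp only [Function.comp]
  rw [pvTC, pvColOf_eq]
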